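-- pv_equiv track=rewrite | github.com/datakind/permanent-colandr-back | colandr/utils.py | assign_status
-- ===== SOURCE A (Python) =====
-- from collections.abc import Iterable, Sequence
--
-- def assign_status(screening_statuses: Sequence[str], num_screeners: int) -> str:
--     """
--     Assign a status to a citation or fulltext, depending on the status decisions
--     of all existing screenings and the number of required screeners.
--
--     Args:
--         screening_statuses
--         num_screeners
--
--     Returns:
--         'not_screened', 'screened_once', 'screened_twice', 'included', or 'excluded'
--     """
--     num_screenings = len(screening_statuses)
--     if num_screenings == 0:
--         return "not_screened"
--     elif num_screenings < num_screeners: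
--         if num_screenings == 1:
--             return "screened_once"
--         else:
--             return "screened_twice"
--     else:
--         if all(status == "excluded" for status in screening_statuses):
--             return "excluded"
--         elif all(status == "included" for status in screening_statuses):
--             return "included"
--         else:
--             return "conflict"
-- ===== SOURCE B (Python) =====
-- def assign_status(screening_statuses, num_screeners):
--     n = len(screening_statuses)
--     if n == 0:
--         return "not_screened"
--     if n < num_screeners:
--         return "screened_once" if n == 1 else "screened_twice"
--     first, *rest = screening_statuses
--     verdict = first if first in ("excluded", "included") else "conflict"
--     for s in rest:
--         v = s if s in ("excluded", "included") else "conflict"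
--         if v != verdict:
--             verdict = "conflict"
--     return verdict
-- ===== Notes on version B (the rewrite author's own statement) =====
-- stated objective: alternative
-- what changed: The two staged all() scans are replaced by a single pass that folds statuses with a normalize-and-merge accumulator (conflict is absorbing), returning the accumulated verdict directly.
import Mathlib
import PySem

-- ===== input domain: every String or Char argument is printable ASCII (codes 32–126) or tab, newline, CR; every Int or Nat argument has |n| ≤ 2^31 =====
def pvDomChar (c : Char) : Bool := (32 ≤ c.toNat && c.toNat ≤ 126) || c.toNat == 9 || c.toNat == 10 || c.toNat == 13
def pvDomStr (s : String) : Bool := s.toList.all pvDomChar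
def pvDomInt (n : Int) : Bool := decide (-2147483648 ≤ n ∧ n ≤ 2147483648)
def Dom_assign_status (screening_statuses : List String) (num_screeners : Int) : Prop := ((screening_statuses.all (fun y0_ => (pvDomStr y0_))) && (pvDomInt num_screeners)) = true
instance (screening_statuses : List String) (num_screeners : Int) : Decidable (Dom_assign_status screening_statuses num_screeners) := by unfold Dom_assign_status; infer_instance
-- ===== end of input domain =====

-- ===== PORT A =====
-- B replaces A's two staged all() scans with a single-pass fold of a normalize-and-merge accumulator (alternative decomposition; same cost).
def assign_status (screening_statuses : List String) (num_screeners : Int) : String :=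
  let num_screenings : Int := screening_statuses.length
  if num_screenings == 0 then "not_screened"
  else if num_screenings < num_screeners then
    if num_screenings == 1 then "screened_once" else "screened_twice"
  else
    if screening_statuses.all (fun status => status == "excluded") then "excluded"
    else if screening_statuses.all (fun status => status == "included") then "included"
    else "conflict"

-- ===== PORT B =====
-- normalize: keep "excluded"/"included", collapse anything else to "conflict"
def pvNorm (s : String) : String :=
  if s == "excluded" || s == "included" then s else "conflict"

-- merge step of the accumulator loop: conflict is absorbing
def pvStep (verdict s : String) : String :=
  let v := pvNorm s
  if v != verdict then "conflict" else verdict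

def assign_status_alt (screening_statuses : List String) (num_screeners : Int) : String :=
  match screening_statuses with
  | [] => "not_screened"
  | first :: rest =>
    let n : Int := (first :: rest).length
    if n < num_screeners then
      if n == 1 then "screened_once" else "screened_twice"
    else
      rest.foldl pvStep (pvNorm first)

-- ===== PRECONDITION & SPEC =====
def Spec_assign_status (screening_statuses : List String) (num_screeners : Int) (out : String) : Prop := out = assign_status_alt screening_statuses num_screeners
instance (screening_statuses : List String) (num_screeners : Int) (out : String) : Decidable (Spec_assign_status screening_statuses num_screeners out) := by unfold Spec_assign_status; infer_instance

-- ===== CLAIM (what is proved, stated in full; the proofs are below) =====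
def Claim_equal_assign_status : Prop := ∀ (screening_statuses : List String) (num_screeners : Int), Dom_assign_status screening_statuses num_screeners → Spec_assign_status screening_statuses num_screeners (assign_status screening_statuses num_screeners)

-- ===== LEMMAS AND PROOFS =====

-- ===== VERDICT (by name: the statement is the Claim_ definition above) =====
theorem pvFold_conflict (rest : List String) :
    rest.foldl pvStep "conflict" = "conflict" := by
  induction rest with
  | nil => rfl
  | cons a t ih =>
    rw [List.foldl_cons]
    have h : pvStep "conflict" a = "conflict" := by
      simp [pvStep]
    rw [h, ih]

theorem pvFold_spec (rest : List String) (w : String) :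
    rest.foldl pvStep w = (if rest.all (fun s => pvNorm s == w) then w else "conflict") := by
  induction rest generalizing w with
  | nil => simp
  | cons a t ih =>
    rw [List.foldl_cons, List.all_cons]
    by_cases h : pvNorm a = w
    · have hs : pvStep w a = w := by simp [pvStep, h]
      rw [hs, ih]
      simp [h]
    · have hs : pvStep w a = "conflict" := by simp [pvStep, h]
      rw [hs, pvFold_conflict]
      simp [h]

theorem pvNorm_eq_excluded (s : String) : (pvNorm s == "excluded") = (s == "excluded") := by
  unfold pvNorm
  by_cases h1 : s = "excluded"
  · simp [h1]
  · by_cases h2 : s = "included" <;> simp [h1, h2]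

theorem pvNorm_eq_included (s : String) : (pvNorm s == "included") = (s == "included") := by
  unfold pvNorm
  by_cases h1 : s = "excluded"
  · simp [h1]
  · by_cases h2 : s = "included" <;> simp [h1, h2]

theorem assign_status_spec : Claim_equal_assign_status := by
  intro xs k _
  unfold Spec_assign_status assign_status assign_status_alt
  cases xs with
  | nil => simp
  | cons first rest =>
    have hB : assign_status_alt (first :: rest) k =
        (if (((first :: rest).length : Int)) < k then
          if ((((first :: rest).length : Int)) == 1) = true then "screened_once" else "screened_twice"
        else rest.foldl pvStep (pvNorm first)) := rfl
    have h0 : ¬ ((((first :: rest).length : Int)) == 0) = true := by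
      simp
      omega
    unfold assign_status_alt at hB
    rw [hB, if_neg h0]
    by_cases hk : (((first :: rest).length : Int)) < k
    · rw [if_pos hk, if_pos hk]
    · rw [if_neg hk, if_neg hk, pvFold_spec]
      by_cases he : first = "excluded"
      · subst he
        have hn : pvNorm "excluded" = "excluded" := by decide
        rw [hn]
        simp only [List.all_cons, pvNorm_eq_excluded, beq_self_eq_true, Bool.true_and]
        by_cases hall : rest.all (fun s => s == "excluded") = true
        · simp [hall]
        · rw [Bool.not_eq_true] at hall
          simp [hall]
      · by_cases hi : first = "included"
        · subst hi
          have hn : pvNorm "included" = "included" := by decide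
          rw [hn]
          simp only [List.all_cons, pvNorm_eq_included]
          by_cases hall : rest.all (fun s => s == "included") = true
          · simp [hall]
          · rw [Bool.not_eq_true] at hall
            simp [hall]
        · have hn : pvNorm first = "conflict" := by simp [pvNorm, he, hi]
          rw [hn]
          simp [List.all_cons, he, hi]
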